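-- pv_equiv track=rewrite | github.com/ayoubarouche/kestar-mcdc | mcdc.py | verify_one_of_two_test_cases_already_exist
-- ===== SOURCE A (Python) =====
-- def verify_one_of_two_test_cases_already_exist(pair_of_test_cases , test_cases_to_verify):
--     first_test_case = pair_of_test_cases[0]
--     secand_test_case = pair_of_test_cases[1]
--     # verify for the first transaction  :
--
--     for test_cases_to_verify_part in test_cases_to_verify :
--         if check_if_exist(first_test_case,test_cases_to_verify_part) :
--             return True
--     for test_cases_to_verify_part in test_cases_to_verify :
--         if check_if_exist(secand_test_case,test_cases_to_verify_part) :
--             return True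
--
--     return False
--
-- def check_if_exist(test_case , test_cases):
--     for test_case_part in test_cases :
--         if test_case==test_case_part:
--             return True
--     return False
-- ===== SOURCE B (Python) =====
-- def verify_one_of_two_test_cases_already_exist(pair_of_test_cases, test_cases_to_verify):
--     first, second = pair_of_test_cases[0], pair_of_test_cases[1]
--     return any(first in part or second in part for part in test_cases_to_verify)
-- ===== Notes on version B (the rewrite author's own statement) =====
-- stated objective: simpler
-- what changed: Replaces the two sequential scans (one per candidate, each with a hand-written inner membership loop) by a single pass using Python's `in` and any(), checking both candidates per inner list.
import Mathlib
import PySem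

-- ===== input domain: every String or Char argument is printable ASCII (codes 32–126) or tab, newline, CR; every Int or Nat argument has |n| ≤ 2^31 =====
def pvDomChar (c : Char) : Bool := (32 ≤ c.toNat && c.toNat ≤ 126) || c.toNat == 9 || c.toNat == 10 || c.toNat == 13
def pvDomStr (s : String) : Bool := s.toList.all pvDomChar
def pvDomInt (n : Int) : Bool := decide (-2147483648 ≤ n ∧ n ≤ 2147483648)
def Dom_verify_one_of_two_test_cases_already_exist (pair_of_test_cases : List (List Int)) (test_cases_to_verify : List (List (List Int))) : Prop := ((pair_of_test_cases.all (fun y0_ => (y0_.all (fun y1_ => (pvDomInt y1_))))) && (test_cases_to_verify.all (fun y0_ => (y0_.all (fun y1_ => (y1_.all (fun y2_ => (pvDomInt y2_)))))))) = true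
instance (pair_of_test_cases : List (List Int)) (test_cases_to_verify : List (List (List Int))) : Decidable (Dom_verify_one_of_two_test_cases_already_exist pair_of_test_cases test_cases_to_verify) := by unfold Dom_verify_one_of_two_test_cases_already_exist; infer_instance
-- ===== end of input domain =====

-- B folds A's two sequential scans (one per candidate, hand-written inner membership loop)
-- into a single any-pass with `in`; objective: simpler. Pre_ excludes pairs of length < 2,
-- where A raises IndexError.


-- ===== PORT A =====
-- check_if_exist: hand-written membership loop
def checkIfExist (test_case : List Int) (test_cases : List (List Int)) : Bool :=
  match test_cases with
  | [] => false
  | p :: rest => if test_case = p then true else checkIfExist test_case rest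

-- first for-loop of A (scan for one candidate)
def scanLoop (tc : List Int) (tcs : List (List (List Int))) : Bool :=
  match tcs with
  | [] => false
  | part :: rest => if checkIfExist tc part then true else scanLoop tc rest

-- pyGet? = Python indexing; none = IndexError, excluded by Pre_ (value false never reached under Pre_)
def verify_one_of_two_test_cases_already_exist (pair_of_test_cases : List (List Int)) (test_cases_to_verify : List (List (List Int))) : Bool :=
  match PySem.List.pyGet? pair_of_test_cases 0, PySem.List.pyGet? pair_of_test_cases 1 with
  | some first_test_case, some secand_test_case =>
      if scanLoop first_test_case test_cases_to_verify then true
      else if scanLoop secand_test_case test_cases_to_verify then true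
      else false
  | _, _ => false

-- ===== PORT B =====
def verify_one_of_two_test_cases_already_exist_alt (pair_of_test_cases : List (List Int)) (test_cases_to_verify : List (List (List Int))) : Bool :=
  -- pair_of_test_cases[0], pair_of_test_cases[1]; none = IndexError, excluded by Pre_
  (((PySem.List.pyGet? pair_of_test_cases 0).bind fun first =>
    ((PySem.List.pyGet? pair_of_test_cases 1).map fun second =>
      test_cases_to_verify.any fun part => part.contains first || part.contains second))).getD false

-- ===== PRECONDITION & SPEC =====
-- A raises IndexError when pair_of_test_cases has fewer than two elements.
def Pre_verify_one_of_two_test_cases_already_exist (pair_of_test_cases : List (List Int)) (test_cases_to_verify : List (List (List Int))) : Prop := 2 ≤ pair_of_test_cases.length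
instance (pair_of_test_cases : List (List Int)) (test_cases_to_verify : List (List (List Int))) : Decidable (Pre_verify_one_of_two_test_cases_already_exist pair_of_test_cases test_cases_to_verify) := by unfold Pre_verify_one_of_two_test_cases_already_exist; infer_instance
def pvWitness_verify_one_of_two_test_cases_already_exist : List (List Int) × List (List (List Int)) := ([[1], [2]], [[[2], [3]]])
def Spec_verify_one_of_two_test_cases_already_exist (pair_of_test_cases : List (List Int)) (test_cases_to_verify : List (List (List Int))) (out : Bool) : Prop := out = verify_one_of_two_test_cases_already_exist_alt pair_of_test_cases test_cases_to_verify
instance (pair_of_test_cases : List (List Int)) (test_cases_to_verify : List (List (List Int))) (out : Bool) : Decidable (Spec_verify_one_of_two_test_cases_already_exist pair_of_test_cases test_cases_to_verify out) := by unfold Spec_verify_one_of_two_test_cases_already_exist; infer_instance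

-- ===== CLAIM =====
def Claim_equal_verify_one_of_two_test_cases_already_exist : Prop := ∀ (pair_of_test_cases : List (List Int)) (test_cases_to_verify : List (List (List Int))), Dom_verify_one_of_two_test_cases_already_exist pair_of_test_cases test_cases_to_verify → Pre_verify_one_of_two_test_cases_already_exist pair_of_test_cases test_cases_to_verify → Spec_verify_one_of_two_test_cases_already_exist pair_of_test_cases test_cases_to_verify (verify_one_of_two_test_cases_already_exist pair_of_test_cases test_cases_to_verify)

-- ===== LEMMAS AND PROOFS =====
theorem checkIfExist_eq_contains (t : List Int) (ts : List (List Int)) :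
    checkIfExist t ts = ts.contains t := by
  induction ts with
  | nil => simp [checkIfExist]
  | cons p rest ih =>
      simp only [checkIfExist, List.contains_cons, ih]
      by_cases h : t = p <;> simp [h]

theorem scanLoop_eq_any (tc : List Int) (tcs : List (List (List Int))) :
    scanLoop tc tcs = tcs.any (fun part => part.contains tc) := by
  induction tcs with
  | nil => simp [scanLoop]
  | cons part rest ih =>
      simp only [scanLoop, List.any_cons, ih, checkIfExist_eq_contains]
      by_cases h : part.contains tc = true <;> simp [h]

theorem any_or_split (l : List (List (List Int))) (f g : List (List Int) → Bool) :
    (l.any f || l.any g) = l.any (fun x => f x || g x) := by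
  induction l with
  | nil => simp
  | cons x rest ih =>
      simp only [List.any_cons, ← ih]
      cases f x <;> cases g x <;> cases rest.any f <;> cases rest.any g <;> rfl

-- ===== VERDICT =====
theorem verify_one_of_two_test_cases_already_exist_spec : Claim_equal_verify_one_of_two_test_cases_already_exist := by
  intro pair tcs _ hpre
  unfold Pre_verify_one_of_two_test_cases_already_exist at hpre
  unfold Spec_verify_one_of_two_test_cases_already_exist
  match pair, hpre with
  | a :: b :: rest, _ =>
    unfold verify_one_of_two_test_cases_already_exist verify_one_of_two_test_cases_already_exist_alt
    have h0 : PySem.List.pyGet? (a :: b :: rest) 0 = some a := PySem.List.pyGet?_zero_cons a (b :: rest)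
    have hone : ((1 : Nat) : Int) = (1 : Int) := by norm_num
    have h1 : PySem.List.pyGet? (a :: b :: rest) 1 = some b := by
      rw [← hone, PySem.List.pyGet?_natCast]; simp
    rw [h0, h1]
    simp only [scanLoop_eq_any, Option.bind_some, Option.map_some, Option.getD_some]
    rw [← any_or_split]
    cases h1 : tcs.any (fun part => part.contains a) <;>
      cases h2 : tcs.any (fun part => part.contains b) <;> simp [h1, h2]
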